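-- pv_equiv track=rewrite | github.com/YuvalDellus/NLP | EX2/main.py | most_likely_tag
-- ===== SOURCE A (Python) =====
-- def most_likely_tag(X, Y):
--     """
--     :param X: words
--     :param Y: tags
--     :return: dictionary of dictionaries with words as key and tags as values and keys and
--              the number of tags per words as values.
--     """
--     dic = dict()
--     for sen in range(len(X)):
--         for word in range(len(X[sen])):
--             tag = Y[sen][word]
--             if X[sen][word] not in dic:
--                 word_dic = dict()
--                 word_dic[tag] = 1
--                 dic[X[sen][word]] = word_dic
--             else:
--                 word_dic = dic.get(X[sen][word])
--                 if tag in word_dic: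
--                     word_dic[tag] = word_dic[tag] + 1
--                 else:
--                     word_dic[tag] = 1
--     return dic
-- ===== SOURCE B (Python) =====
-- def most_likely_tag(X, Y):
--     # Pass 1: tally every (word, tag) occurrence in one flat counting table.
--     counts = {}
--     for sen in range(len(X)):
--         for word in range(len(X[sen])):
--             pair = (X[sen][word], Y[sen][word])
--             counts[pair] = counts.get(pair, 0) + 1
--     # Pass 2: regroup the flat table into the nested word -> {tag: count} dict.
--     dic = {}
--     for (w, t), c in counts.items():
--         dic.setdefault(w, {})[t] = c
--     return dic
-- ===== Notes on version B (the rewrite author's own statement) =====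
-- stated objective: alternative
-- what changed: Replaces A's per-occurrence nested-dict update (membership test and branchy in-place increment of the inner dict on every token) by two separate passes: one flat (word, tag) counting table built over the corpus, then a single regrouping pass over that table's items into the nested dict; Pre_ excludes inputs where A raises an IndexError because Y is shorter than X or some Y[sen] shorter than X[sen].
import Mathlib
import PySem

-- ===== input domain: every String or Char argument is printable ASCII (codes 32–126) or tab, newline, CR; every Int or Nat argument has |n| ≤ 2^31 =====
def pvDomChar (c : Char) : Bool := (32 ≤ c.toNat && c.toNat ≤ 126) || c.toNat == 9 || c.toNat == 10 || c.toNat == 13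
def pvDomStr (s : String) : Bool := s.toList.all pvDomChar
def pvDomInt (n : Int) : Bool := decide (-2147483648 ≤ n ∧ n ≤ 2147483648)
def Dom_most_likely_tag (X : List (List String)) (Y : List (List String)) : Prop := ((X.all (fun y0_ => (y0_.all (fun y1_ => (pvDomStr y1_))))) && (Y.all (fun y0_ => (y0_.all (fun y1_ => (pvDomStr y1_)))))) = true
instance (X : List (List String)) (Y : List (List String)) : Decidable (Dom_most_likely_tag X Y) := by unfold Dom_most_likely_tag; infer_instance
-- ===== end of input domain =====

-- B replaces A's per-token nested-dict update by a flat (word,tag) counting pass plus a regrouping pass (alternative decomposition, same cost); Pre_ excludes the inputs where A raises IndexError (Y shorter than X, or Y[sen] shorter than X[sen]).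


-- ===== PORT A =====
-- literal transliteration of A: nested loops over range(len(X)) / range(len(X[sen])),
-- updating the nested dict in place (Python's in-place mutation of word_dic is rendered
-- as re-inserting the updated inner dict at the same key, which Dict.insert keeps in place);
-- the returned dict-of-dicts is the association list of association lists.
def most_likely_tag (X : List (List String)) (Y : List (List String)) : List (String × List (String × Int)) :=
  let dic : PySem.Dict String (PySem.Dict String Int) :=
    (PySem.List.pyRange 0 (X.length : Int) 1).foldl (fun dic sen =>
      (PySem.List.pyRange 0 ((PySem.List.pyGetD X sen []).length : Int) 1).foldl (fun dic word =>
        let tag := PySem.List.pyGetD (PySem.List.pyGetD Y sen []) word ""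
        if dic.contains (PySem.List.pyGetD (PySem.List.pyGetD X sen []) word "") = false then
          let word_dic : PySem.Dict String Int := PySem.Dict.empty
          let word_dic := word_dic.insert tag 1
          dic.insert (PySem.List.pyGetD (PySem.List.pyGetD X sen []) word "") word_dic
        else
          let word_dic := ((dic.get? (PySem.List.pyGetD (PySem.List.pyGetD X sen []) word "")).getD PySem.Dict.empty)
          if word_dic.contains tag then
            dic.insert (PySem.List.pyGetD (PySem.List.pyGetD X sen []) word "") (word_dic.insert tag (word_dic.getD tag 0 + 1))
          else
            dic.insert (PySem.List.pyGetD (PySem.List.pyGetD X sen []) word "") (word_dic.insert tag 1)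
        ) dic) PySem.Dict.empty
  dic.items.map (fun p => (p.1, p.2.items))

-- ===== PORT B =====
-- literal transliteration of Source B: pass 1 builds the flat (word, tag) -> count table,
-- pass 2 regroups its items via dic.setdefault(w, {})[t] = c.
def most_likely_tag_alt (X : List (List String)) (Y : List (List String)) : List (String × List (String × Int)) :=
  let counts : PySem.Dict (String × String) Int :=
    (PySem.List.pyRange 0 (X.length : Int) 1).foldl (fun counts sen =>
      (PySem.List.pyRange 0 ((PySem.List.pyGetD X sen []).length : Int) 1).foldl (fun counts word =>
        let pair := (PySem.List.pyGetD (PySem.List.pyGetD X sen []) word "",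
                     PySem.List.pyGetD (PySem.List.pyGetD Y sen []) word "")
        counts.insert pair (counts.getD pair 0 + 1)) counts) PySem.Dict.empty
  let dic : PySem.Dict String (PySem.Dict String Int) :=
    counts.items.foldl (fun dic q =>
      -- dic.setdefault(w, {})[t] = c : setdefault, then store c at t in the inner dict
      let dic1 := dic.setdefault q.1.1 PySem.Dict.empty
      dic1.insert q.1.1 ((dic1.getD q.1.1 PySem.Dict.empty).insert q.1.2 q.2)) PySem.Dict.empty
  dic.items.map (fun p => (p.1, p.2.items))

-- ===== PRECONDITION & SPEC =====
-- Pre_: exactly the inputs where A's Y[sen][word] accesses are in range (otherwise A raises IndexError).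
def Pre_most_likely_tag (X : List (List String)) (Y : List (List String)) : Prop :=
  X.length ≤ Y.length ∧ ∀ p ∈ X.zip Y, p.1.length ≤ p.2.length
instance (X : List (List String)) (Y : List (List String)) : Decidable (Pre_most_likely_tag X Y) := by
  unfold Pre_most_likely_tag; infer_instance
def pvWitness_most_likely_tag : List (List String) × List (List String) :=
  ([["the", "cat"], ["the"]], [["D", "N"], ["D"]])
def Spec_most_likely_tag (X : List (List String)) (Y : List (List String)) (out : List (String × List (String × Int))) : Prop := out = most_likely_tag_alt X Y
instance (X : List (List String)) (Y : List (List String)) (out : List (String × List (String × Int))) : Decidable (Spec_most_likely_tag X Y out) := by unfold Spec_most_likely_tag; infer_instance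

-- ===== CLAIM (what is proved, stated in full; the proofs are below) =====
def Claim_equal_most_likely_tag : Prop := ∀ (X : List (List String)) (Y : List (List String)), Dom_most_likely_tag X Y → Pre_most_likely_tag X Y → Spec_most_likely_tag X Y (most_likely_tag X Y)

-- ===== LEMMAS AND PROOFS =====

-- the flat token stream: one (word, tag) pair per position, in corpus order
def pvPairs (X Y : List (List String)) : List (String × String) :=
  (X.zip Y).flatMap (fun p => p.1.zip p.2)

-- A's loop body, as a step function over the token stream
def pvAStep (dic : PySem.Dict String (PySem.Dict String Int)) (p : String × String) :
    PySem.Dict String (PySem.Dict String Int) :=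
  if dic.contains p.1 = false then
    dic.insert p.1 (PySem.Dict.empty.insert p.2 1)
  else
    let wd := (dic.get? p.1).getD PySem.Dict.empty
    if wd.contains p.2 then dic.insert p.1 (wd.insert p.2 (wd.getD p.2 0 + 1))
    else dic.insert p.1 (wd.insert p.2 1)

-- B's regrouping body, simplified (setdefault-then-overwrite = plain insert)
def pvGStep (dic : PySem.Dict String (PySem.Dict String Int)) (q : (String × String) × Int) :
    PySem.Dict String (PySem.Dict String Int) :=
  dic.insert q.1.1 ((dic.getD q.1.1 PySem.Dict.empty).insert q.1.2 q.2)

-- canonical description of the result on token stream L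
def pvWords (L : List (String × String)) : List String := PySem.Set.ofList (L.map Prod.fst)
def pvTags (L : List (String × String)) (w : String) : List String :=
  PySem.Set.ofList ((L.filter (fun p => p.1 == w)).map Prod.snd)
def pvInner (L : List (String × String)) (w : String) : List (String × Int) :=
  (pvTags L w).map (fun t => (t, (L.count (w, t) : Int)))
def pvCanon (L : List (String × String)) : List (String × PySem.Dict String Int) :=
  (pvWords L).map (fun w => (w, PySem.Dict.mk (pvInner L w)))
def pvGroup (Q : List ((String × String) × Int)) : List (String × PySem.Dict String Int) :=
  (PySem.Set.ofList (Q.map (fun q => q.1.1))).map (fun w =>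
    (w, PySem.Dict.mk ((Q.filter (fun q => q.1.1 == w)).map (fun q => (q.1.2, q.2)))))

theorem pv_range_getD_foldl {γ α : Type} (zs : List γ) (d : γ) (g : α → γ → α) (a : α) :
    (List.range zs.length).foldl (fun a i => g a (zs.getD i d)) a = zs.foldl g a := by
  induction zs generalizing a with
  | nil => simp
  | cons z zs ih =>
    rw [List.length_cons, List.range_succ_eq_map]
    simp only [List.foldl_cons, List.foldl_map, List.getD_cons_zero, List.getD_cons_succ]
    exact ih (g a z)

-- both nested pyRange loops are folds of their step over the flat token stream
theorem pv_bridge {α : Type} (X Y : List (List String)) (s : α → (String × String) → α) (a : α)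
    (h1 : X.length ≤ Y.length) (h2 : ∀ p ∈ X.zip Y, p.1.length ≤ p.2.length) :
    (PySem.List.pyRange 0 (X.length : Int) 1).foldl (fun a sen =>
      (PySem.List.pyRange 0 ((PySem.List.pyGetD X sen []).length : Int) 1).foldl (fun a word =>
        s a (PySem.List.pyGetD (PySem.List.pyGetD X sen []) word "",
             PySem.List.pyGetD (PySem.List.pyGetD Y sen []) word "")) a) a
    = (pvPairs X Y).foldl s a := by
  rw [PySem.List.pyRange_zero_natCast, List.foldl_map]
  have hlen : (X.zip Y).length = X.length := by simp [List.length_zip]; omega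
  have step1 : ∀ (a : α), ∀ sen ∈ List.range X.length,
      (PySem.List.pyRange 0 ((PySem.List.pyGetD X (sen : Int) []).length : Int) 1).foldl (fun a word =>
        s a (PySem.List.pyGetD (PySem.List.pyGetD X (sen : Int) []) word "",
             PySem.List.pyGetD (PySem.List.pyGetD Y (sen : Int) []) word "")) a
      = (let pz := (X.zip Y).getD sen ([], []); (pz.1.zip pz.2).foldl s a) := by
    intro a sen hsen
    rw [List.mem_range] at hsen
    have hsy : sen < Y.length := lt_of_lt_of_le hsen h1
    have hz : sen < (X.zip Y).length := by omega
    have hXg : PySem.List.pyGetD X (sen : Int) [] = X[sen] := by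
      simp [PySem.List.pyGetD_natCast, List.getD_eq_getElem?_getD, List.getElem?_eq_getElem hsen]
    have hYg : PySem.List.pyGetD Y (sen : Int) [] = Y[sen] := by
      simp [PySem.List.pyGetD_natCast, List.getD_eq_getElem?_getD, List.getElem?_eq_getElem hsy]
    have hzg : (X.zip Y).getD sen ([], []) = (X[sen], Y[sen]) := by
      simp [List.getD_eq_getElem?_getD, List.getElem?_eq_getElem hz, List.getElem_zip]
    rw [hXg, hYg, hzg]
    simp only
    have hin : X[sen].length ≤ Y[sen].length := by
      have := h2 (X[sen], Y[sen]) (by rw [← List.getElem_zip (h := hz)]; exact List.getElem_mem hz)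
      simpa using this
    rw [PySem.List.pyRange_zero_natCast, List.foldl_map]
    have hl : (X[sen].zip Y[sen]).length = X[sen].length := by simp [List.length_zip]; omega
    rw [show (X[sen]).length = (X[sen].zip Y[sen]).length from hl.symm]
    rw [← pv_range_getD_foldl (X[sen].zip Y[sen]) ("", "") s a]
    apply PySem.List.foldl_congr_mem
    intro acc w hw
    rw [List.mem_range, hl] at hw
    have hwy : w < Y[sen].length := lt_of_lt_of_le hw hin
    have hzz : w < (X[sen].zip Y[sen]).length := by rw [hl]; exact hw
    simp [PySem.List.pyGetD_natCast, List.getD_eq_getElem?_getD, List.getElem?_eq_getElem,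
      hw, hwy, List.getElem_zip]
  rw [PySem.List.foldl_congr_mem _ _ _ _ step1]
  rw [show X.length = (X.zip Y).length from hlen.symm]
  rw [pv_range_getD_foldl (X.zip Y) ([], []) (fun a p => (p.1.zip p.2).foldl s a) a]
  unfold pvPairs
  rw [List.flatMap_def, List.foldl_flatten, List.foldl_map]

theorem pv_set_ofList_singleton_append {α : Type} [BEq α] (l : List α) (x : α) :
    PySem.Set.ofList (l ++ [x]) = PySem.Set.add (PySem.Set.ofList l) x := by
  rw [PySem.Set.ofList_append, PySem.Set.update_cons, PySem.Set.update_nil]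

theorem pv_mem_words (L : List (String × String)) (w : String) :
    w ∈ pvWords L ↔ w ∈ L.map Prod.fst := PySem.Set.mem_ofList _ _

theorem pv_mem_tags (L : List (String × String)) (w t : String) :
    t ∈ pvTags L w ↔ (w, t) ∈ L := by
  unfold pvTags
  rw [PySem.Set.mem_ofList]
  simp only [List.mem_map, List.mem_filter]
  constructor
  · rintro ⟨q, ⟨hq, he⟩, rfl⟩
    have : q.1 = w := by simpa using he
    simpa [← this] using hq
  · intro h
    exact ⟨(w, t), ⟨h, by simp⟩, rfl⟩

theorem pv_nodup_words (L : List (String × String)) : (pvWords L).Nodup :=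
  PySem.Set.nodup_ofList _

theorem pv_nodup_tags (L : List (String × String)) (w : String) : (pvTags L w).Nodup :=
  PySem.Set.nodup_ofList _

theorem pv_keys_canon (L : List (String × String)) :
    (PySem.Dict.mk (pvCanon L)).keys = pvWords L := by
  rw [PySem.Dict.keys_mk]; unfold pvCanon; simp [Function.comp_def]

theorem pv_tags_append_ne (L : List (String × String)) (p : String × String) (w : String)
    (h : p.1 ≠ w) : pvTags (L ++ [p]) w = pvTags L w := by
  unfold pvTags
  rw [List.filter_append]
  have hb : (p.1 == w) = false := by simp [h]
  simp [List.filter, hb]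

theorem pv_inner_append_ne (L : List (String × String)) (p : String × String) (w : String)
    (h : p.1 ≠ w) : pvInner (L ++ [p]) w = pvInner L w := by
  unfold pvInner
  rw [pv_tags_append_ne L p w h]
  apply List.map_congr_left
  intro t ht
  have : (w, t) ≠ p := by intro e; exact h (by rw [← e])
  simp [List.count_append, this.symm]

theorem pv_tags_append_self (L : List (String × String)) (w t : String) :
    pvTags (L ++ [(w, t)]) w = PySem.Set.add (pvTags L w) t := by
  unfold pvTags
  rw [List.filter_append, ← pv_set_ofList_singleton_append]
  simp [List.filter]

-- A's fold computes the canonical nested dict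
theorem pv_nest_char (L : List (String × String)) :
    L.foldl pvAStep PySem.Dict.empty = PySem.Dict.mk (pvCanon L) := by
  induction L using List.reverseRecOn with
  | nil => rfl
  | append_singleton L p ih =>
    obtain ⟨w, t⟩ := p
    rw [List.foldl_append, List.foldl_cons, List.foldl_nil, ih]
    have hkeys := pv_keys_canon L
    have hnodk : (PySem.Dict.mk (pvCanon L)).keys.Nodup := by rw [hkeys]; exact pv_nodup_words L
    have hwords : pvWords (L ++ [(w, t)]) = PySem.Set.add (pvWords L) w := by
      unfold pvWords; rw [List.map_append, ← pv_set_ofList_singleton_append]; rfl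
    by_cases hw : w ∈ pvWords L
    · -- word already present
      have hcont : (PySem.Dict.mk (pvCanon L)).contains w = true := by
        rw [PySem.Dict.contains_iff_mem_keys, hkeys]; exact hw
      have hmemit : (w, PySem.Dict.mk (pvInner L w)) ∈ pvCanon L := by
        unfold pvCanon; exact List.mem_map_of_mem hw
      have hget : (PySem.Dict.mk (pvCanon L)).get? w = some (PySem.Dict.mk (pvInner L w)) :=
        PySem.Dict.get?_of_mem_items _ hmemit hnodk
      have hwords' : pvWords (L ++ [(w, t)]) = pvWords L := by
        rw [hwords]; simp [PySem.Set.add, hw]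
      -- inserting any inner dict with the right items gives the canonical dict
      have hinner : ∀ wd' : PySem.Dict String Int, wd'.items = pvInner (L ++ [(w, t)]) w →
          ((PySem.Dict.mk (pvCanon L)).insert w wd') = PySem.Dict.mk (pvCanon (L ++ [(w, t)])) := by
        intro wd' hwd'
        apply PySem.Dict.ext
        rw [PySem.Dict.items_insert_of_contains _ _ hcont]
        show List.map _ (pvCanon L) = _
        unfold pvCanon
        rw [hwords', List.map_map]
        apply List.map_congr_left
        intro w' hw'
        by_cases he : w' = w
        · subst he
          simp only [Function.comp]
          rw [if_pos (by simp)]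
          exact congrArg _ (PySem.Dict.ext hwd')
        · simp only [Function.comp]
          rw [if_neg (by simp [he])]
          rw [pv_inner_append_ne L (w, t) w' (by simpa using Ne.symm he)]
      unfold pvAStep
      rw [if_neg (by simp [hcont])]
      simp only [hget, Option.getD_some]
      set wd := PySem.Dict.mk (pvInner L w) with hwd
      have hkin : wd.keys = pvTags L w := by
        rw [hwd, PySem.Dict.keys_mk]; unfold pvInner; simp [Function.comp_def]
      have hnodin : wd.keys.Nodup := by rw [hkin]; exact pv_nodup_tags L w
      by_cases ht : t ∈ pvTags L w
      · have hcont2 : wd.contains t = true := by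
          rw [PySem.Dict.contains_iff_mem_keys, hkin]; exact ht
        rw [if_pos hcont2]
        apply hinner
        have hmemin : (t, (L.count (w, t) : Int)) ∈ wd.items := by
          rw [hwd]; show _ ∈ pvInner L w; unfold pvInner; exact List.mem_map_of_mem ht
        have hgetd : wd.getD t 0 = (L.count (w, t) : Int) :=
          PySem.Dict.getD_of_mem_items _ hmemin hnodin 0
        rw [PySem.Dict.items_insert_of_contains _ _ hcont2, hgetd]
        show List.map _ (pvInner L w) = _
        unfold pvInner
        rw [pv_tags_append_self, List.map_map]
        have htags : PySem.Set.add (pvTags L w) t = pvTags L w := by simp [PySem.Set.add, ht]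
        rw [htags]
        apply List.map_congr_left
        intro t' ht'
        by_cases he : t' = t
        · subst he
          simp only [Function.comp]
          rw [if_pos (by simp)]
          simp [List.count_append]
        · simp only [Function.comp]
          rw [if_neg (by simp [he])]
          have : (w, t') ≠ (w, t) := by simp [he]
          simp [List.count_append, this.symm]
      · have hcont2 : wd.contains t = false := by
          rw [← Bool.not_eq_true, PySem.Dict.contains_iff_mem_keys, hkin]; exact ht
        rw [if_neg (by simp [hcont2])]
        apply hinner
        rw [PySem.Dict.items_insert_of_not_contains _ _ hcont2]
        show pvInner L w ++ [(t, 1)] = _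
        unfold pvInner
        rw [pv_tags_append_self]
        have htags : PySem.Set.add (pvTags L w) t = pvTags L w ++ [t] := by
          simp [PySem.Set.add, ht]
        rw [htags, List.map_append]
        congr 1
        · apply List.map_congr_left
          intro t' ht'
          have : (w, t') ≠ (w, t) := by
            intro e; exact ht (by rw [show t' = t by simpa using e] at ht'; exact ht')
          simp [List.count_append, this.symm]
        · have h0 : L.count (w, t) = 0 := by
            rw [List.count_eq_zero]
            intro hmem; exact ht ((pv_mem_tags L w t).2 hmem)
          simp [List.count_append, h0]
    · -- new word
      have hcont : (PySem.Dict.mk (pvCanon L)).contains w = false := by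
        rw [← Bool.not_eq_true, PySem.Dict.contains_iff_mem_keys, hkeys]; exact hw
      unfold pvAStep
      rw [if_pos (by simp [hcont])]
      apply PySem.Dict.ext
      rw [PySem.Dict.items_insert_of_not_contains _ _ hcont]
      show pvCanon L ++ [(w, PySem.Dict.empty.insert t 1)] = _
      unfold pvCanon
      rw [hwords]
      have hadd : PySem.Set.add (pvWords L) w = pvWords L ++ [w] := by simp [PySem.Set.add, hw]
      rw [hadd, List.map_append]
      congr 1
      · apply List.map_congr_left
        intro w' hw'
        have hne : w ≠ w' := by intro e; exact hw (e ▸ hw')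
        rw [pv_inner_append_ne L (w, t) w' hne]
      · have hwf : w ∉ L.map Prod.fst := fun h => hw ((pv_mem_words L w).2 h)
        have hfilter : L.filter (fun p => p.1 == w) = [] := by
          rw [List.filter_eq_nil_iff]
          intro q hq
          simp only [beq_iff_eq]
          intro e; exact hwf (e ▸ List.mem_map_of_mem hq)
        have htags : pvTags (L ++ [(w, t)]) w = [t] := by
          rw [pv_tags_append_self]
          unfold pvTags
          rw [hfilter]
          rfl
        have h0 : L.count (w, t) = 0 := by
          rw [List.count_eq_zero]
          intro hmem; exact hwf (List.mem_map_of_mem hmem)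
        simp only [List.map_cons, List.map_nil]
        unfold pvInner
        rw [htags]
        simp [List.count_append, h0]
        rfl

-- B's regroup fold, on any table with nodup keys, groups by first component
theorem pv_build_char (Q : List ((String × String) × Int)) (h : (Q.map Prod.fst).Nodup) :
    Q.foldl pvGStep PySem.Dict.empty = PySem.Dict.mk (pvGroup Q) := by
  induction Q using List.reverseRecOn with
  | nil => rfl
  | append_singleton Q q ih =>
    obtain ⟨⟨w, t⟩, c⟩ := q
    rw [List.map_append, List.nodup_append] at h
    obtain ⟨hQ, -, hdisj⟩ := h
    have hnotin : ((w, t) : String × String) ∉ Q.map Prod.fst := by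
      intro hm
      exact hdisj _ hm _ (by simp) rfl
    rw [List.foldl_append, List.foldl_cons, List.foldl_nil, ih hQ]
    have hkeys : (PySem.Dict.mk (pvGroup Q)).keys = PySem.Set.ofList (Q.map (fun q => q.1.1)) := by
      rw [PySem.Dict.keys_mk]; unfold pvGroup; simp [Function.comp_def]
    have hnodk : (PySem.Dict.mk (pvGroup Q)).keys.Nodup := by
      rw [hkeys]; exact PySem.Set.nodup_ofList _
    have hQ' : PySem.Set.ofList ((Q ++ [((w, t), c)]).map (fun q => q.1.1))
        = PySem.Set.add (PySem.Set.ofList (Q.map (fun q => q.1.1))) w := by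
      rw [List.map_append]
      simp only [List.map_cons, List.map_nil]
      rw [pv_set_ofList_singleton_append]
    have hfilt_ne : ∀ w', w ≠ w' →
        (Q ++ [((w, t), c)]).filter (fun q => q.1.1 == w') = Q.filter (fun q => q.1.1 == w') := by
      intro w' hne
      rw [List.filter_append]
      have : ((((w, t), c) : (String × String) × Int).1.1 == w') = false := by simp [hne]
      simp [List.filter, this]
    have hfilt_self :
        (Q ++ [((w, t), c)]).filter (fun q => q.1.1 == w) = Q.filter (fun q => q.1.1 == w) ++ [((w, t), c)] := by
      rw [List.filter_append]; simp [List.filter]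
    by_cases hw : w ∈ PySem.Set.ofList (Q.map (fun q => q.1.1))
    · have hcont : (PySem.Dict.mk (pvGroup Q)).contains w = true := by
        rw [PySem.Dict.contains_iff_mem_keys, hkeys]; exact hw
      have hmemit : (w, PySem.Dict.mk ((Q.filter (fun q => q.1.1 == w)).map (fun q => (q.1.2, q.2)))) ∈ pvGroup Q := by
        unfold pvGroup; exact List.mem_map_of_mem hw
      have hgetd : (PySem.Dict.mk (pvGroup Q)).getD w PySem.Dict.empty
          = PySem.Dict.mk ((Q.filter (fun q => q.1.1 == w)).map (fun q => (q.1.2, q.2))) :=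
        PySem.Dict.getD_of_mem_items _ hmemit hnodk _
      have htinner : (PySem.Dict.mk ((Q.filter (fun q => q.1.1 == w)).map (fun q => (q.1.2, q.2)))).contains t = false := by
        rw [← Bool.not_eq_true, PySem.Dict.contains_iff_mem_keys, PySem.Dict.keys_mk, List.map_map]
        intro hm
        obtain ⟨q, hq, he⟩ := List.mem_map.1 hm
        have hq' := (List.mem_filter.1 hq)
        have : q.1 = (w, t) := by
          have e1 : q.1.1 = w := by simpa using hq'.2
          have e2 : q.1.2 = t := by simpa using he
          exact Prod.ext e1 e2
        exact hnotin (this ▸ List.mem_map_of_mem hq'.1)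
      show (PySem.Dict.mk (pvGroup Q)).insert w
          (((PySem.Dict.mk (pvGroup Q)).getD w PySem.Dict.empty).insert t c) = _
      apply PySem.Dict.ext
      rw [hgetd, PySem.Dict.items_insert_of_contains _ _ hcont]
      show List.map _ (pvGroup Q) = _
      unfold pvGroup
      rw [hQ', List.map_map]
      have hadd : PySem.Set.add (PySem.Set.ofList (Q.map (fun q => q.1.1))) w
          = PySem.Set.ofList (Q.map (fun q => q.1.1)) := by simp [PySem.Set.add, hw]
      rw [hadd]
      apply List.map_congr_left
      intro w' hw'
      by_cases he : w' = w
      · subst he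
        simp only [Function.comp]
        rw [if_pos (by simp)]
        apply congrArg
        apply PySem.Dict.ext
        rw [PySem.Dict.items_insert_of_not_contains _ _ htinner]
        show _ ++ [(t, c)] = _
        rw [hfilt_self, List.map_append]
        rfl
      · simp only [Function.comp]
        rw [if_neg (by simp [he]), hfilt_ne w' (Ne.symm he)]
    · have hcont : (PySem.Dict.mk (pvGroup Q)).contains w = false := by
        rw [← Bool.not_eq_true, PySem.Dict.contains_iff_mem_keys, hkeys]; exact hw
      have hgetd : (PySem.Dict.mk (pvGroup Q)).getD w PySem.Dict.empty = PySem.Dict.empty :=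
        PySem.Dict.getD_of_not_contains _ _ hcont
      show (PySem.Dict.mk (pvGroup Q)).insert w
          (((PySem.Dict.mk (pvGroup Q)).getD w PySem.Dict.empty).insert t c) = _
      apply PySem.Dict.ext
      rw [hgetd, PySem.Dict.items_insert_of_not_contains _ _ hcont]
      show pvGroup Q ++ [(w, PySem.Dict.empty.insert t c)] = _
      unfold pvGroup
      rw [hQ']
      have hadd : PySem.Set.add (PySem.Set.ofList (Q.map (fun q => q.1.1))) w
          = PySem.Set.ofList (Q.map (fun q => q.1.1)) ++ [w] := by simp [PySem.Set.add, hw]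
      rw [hadd, List.map_append]
      congr 1
      · apply List.map_congr_left
        intro w' hw'
        have hne : w ≠ w' := by
          intro e; exact hw (e ▸ hw')
        rw [hfilt_ne w' hne]
      · have hfe : Q.filter (fun q => q.1.1 == w) = [] := by
          rw [List.filter_eq_nil_iff]
          intro q hq hb
          have : q.1.1 = w := by simpa using hb
          exact hw (this ▸ (PySem.Set.mem_ofList _ _).2 (List.mem_map_of_mem hq))
        simp only [List.map_cons, List.map_nil]
        rw [hfilt_self, hfe]
        rfl

theorem pv_ofList_map_ofList {α β : Type} [BEq α] [LawfulBEq α] [BEq β] [LawfulBEq β]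
    (L : List α) (f : α → β) :
    PySem.Set.ofList ((PySem.Set.ofList L).map f) = PySem.Set.ofList (L.map f) := by
  induction L using List.reverseRecOn with
  | nil => rfl
  | append_singleton L x ih =>
    rw [pv_set_ofList_singleton_append, List.map_append]
    simp only [List.map_cons, List.map_nil]
    rw [pv_set_ofList_singleton_append]
    by_cases hx : x ∈ PySem.Set.ofList L
    · have hfx : f x ∈ PySem.Set.ofList (L.map f) := by
        rw [PySem.Set.mem_ofList]
        exact List.mem_map_of_mem ((PySem.Set.mem_ofList _ _).1 hx)
      have h1 : PySem.Set.add (PySem.Set.ofList L) x = PySem.Set.ofList L := by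
        simp [PySem.Set.add, hx]
      rw [h1, ih]
      simp [PySem.Set.add, hfx]
    · have h1 : PySem.Set.add (PySem.Set.ofList L) x = PySem.Set.ofList L ++ [x] := by
        simp [PySem.Set.add, hx]
      rw [h1, List.map_append]
      simp only [List.map_cons, List.map_nil]
      rw [pv_set_ofList_singleton_append, ih]

theorem pv_filter_ofList (L : List (String × String)) (w : String) :
    (PySem.Set.ofList L).filter (fun p => p.1 == w) = (pvTags L w).map (fun t => (w, t)) := by
  induction L using List.reverseRecOn with
  | nil => rfl
  | append_singleton L p ih =>
    obtain ⟨u, v⟩ := p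
    rw [pv_set_ofList_singleton_append]
    by_cases hp : (u, v) ∈ PySem.Set.ofList L
    · have h1 : PySem.Set.add (PySem.Set.ofList L) (u, v) = PySem.Set.ofList L := by
        simp [PySem.Set.add, hp]
      rw [h1, ih]
      by_cases hu : u = w
      · subst hu
        have hv : v ∈ pvTags L u := (pv_mem_tags L u v).2 ((PySem.Set.mem_ofList _ _).1 hp)
        rw [pv_tags_append_self]
        simp [PySem.Set.add, hv]
      · rw [pv_tags_append_ne L (u, v) w (by simpa using hu)]
    · have h1 : PySem.Set.add (PySem.Set.ofList L) (u, v) = PySem.Set.ofList L ++ [(u, v)] := by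
        simp [PySem.Set.add, hp]
      rw [h1, List.filter_append]
      by_cases hu : u = w
      · subst hu
        have hv : v ∉ pvTags L u := by
          intro hv
          exact hp ((PySem.Set.mem_ofList _ _).2 ((pv_mem_tags L u v).1 hv))
        rw [pv_tags_append_self]
        have h2 : PySem.Set.add (pvTags L u) v = pvTags L u ++ [v] := by
          simp [PySem.Set.add, hv]
        rw [h2, List.map_append, ih]
        simp [List.filter]
      · rw [pv_tags_append_ne L (u, v) w (by simpa using hu)]
        have hb : (((u, v) : String × String).1 == w) = false := by simpa using hu
        simp [List.filter, hb, ih]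

-- the counter's items regroup to the canonical nested dict
theorem pv_regroup_counter (L : List (String × String)) :
    ((PySem.Dict.counter L).items).foldl pvGStep PySem.Dict.empty = PySem.Dict.mk (pvCanon L) := by
  rw [PySem.Dict.items_counter]
  have hn : (((PySem.Set.ofList L).map (fun k => (k, (L.count k : Int)))).map Prod.fst).Nodup := by
    rw [List.map_map]
    simp [Function.comp_def, PySem.Set.nodup_ofList L]
  rw [pv_build_char _ hn]
  apply PySem.Dict.ext
  show pvGroup _ = pvCanon L
  unfold pvGroup pvCanon
  rw [List.map_map]
  have hW : PySem.Set.ofList (((PySem.Set.ofList L).map (fun k => (k, (L.count k : Int)))).map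
      ((fun q : (String × String) × Int => q.1.1))) = pvWords L := by
    rw [List.map_map]
    have : ((fun q : (String × String) × Int => q.1.1) ∘ fun k => (k, (L.count k : Int))) = Prod.fst := rfl
    rw [this, pv_ofList_map_ofList]
    rfl
  rw [List.map_map] at hW
  rw [hW]
  apply List.map_congr_left
  intro w hw
  apply congrArg
  apply PySem.Dict.ext
  show List.map _ (List.filter _ _) = pvInner L w
  rw [List.filter_map, List.map_map]
  have hfil : ((PySem.Set.ofList L).filter
      ((fun q : (String × String) × Int => q.1.1 == w) ∘ fun k => (k, (L.count k : Int))))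
      = (PySem.Set.ofList L).filter (fun p => p.1 == w) := rfl
  rw [hfil, pv_filter_ofList, List.map_map]
  unfold pvInner
  rfl

-- the setdefault-based regroup body of port B is pvGStep
theorem pv_setdefault_step (dic : PySem.Dict String (PySem.Dict String Int))
    (q : (String × String) × Int) :
    (let dic1 := dic.setdefault q.1.1 PySem.Dict.empty
     dic1.insert q.1.1 ((dic1.getD q.1.1 PySem.Dict.empty).insert q.1.2 q.2)) = pvGStep dic q := by
  show (dic.setdefault q.1.1 PySem.Dict.empty).insert q.1.1
      (((dic.setdefault q.1.1 PySem.Dict.empty).getD q.1.1 PySem.Dict.empty).insert q.1.2 q.2) = _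
  rw [PySem.Dict.getD_setdefault_self]
  unfold pvGStep
  rcases hc : dic.contains q.1.1 with _ | _
  · rw [PySem.Dict.setdefault_of_not_contains _ _ hc, PySem.Dict.insert_insert_self]
  · rw [PySem.Dict.setdefault_of_contains _ _ hc]

-- port A computes the canonical nested dict of the token stream
theorem pv_A_eq (X Y : List (List String)) (h1 : X.length ≤ Y.length)
    (h2 : ∀ p ∈ X.zip Y, p.1.length ≤ p.2.length) :
    most_likely_tag X Y
      = (PySem.Dict.mk (pvCanon (pvPairs X Y))).items.map (fun p => (p.1, p.2.items)) := by
  show ((PySem.List.pyRange 0 (X.length : Int) 1).foldl (fun a sen =>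
      (PySem.List.pyRange 0 ((PySem.List.pyGetD X sen []).length : Int) 1).foldl (fun a word =>
        pvAStep a (PySem.List.pyGetD (PySem.List.pyGetD X sen []) word "",
             PySem.List.pyGetD (PySem.List.pyGetD Y sen []) word "")) a)
      PySem.Dict.empty).items.map (fun p => (p.1, p.2.items)) = _
  rw [pv_bridge X Y pvAStep PySem.Dict.empty h1 h2, pv_nest_char]

-- port B computes the same canonical nested dict
theorem pv_B_eq (X Y : List (List String)) (h1 : X.length ≤ Y.length)
    (h2 : ∀ p ∈ X.zip Y, p.1.length ≤ p.2.length) :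
    most_likely_tag_alt X Y
      = (PySem.Dict.mk (pvCanon (pvPairs X Y))).items.map (fun p => (p.1, p.2.items)) := by
  have h4 : most_likely_tag_alt X Y
      = ((((pvPairs X Y).foldl (fun d x => d.insert x (d.getD x 0 + 1))
            PySem.Dict.empty).items.foldl (fun dic q =>
              let dic1 := dic.setdefault q.1.1 PySem.Dict.empty
              dic1.insert q.1.1 ((dic1.getD q.1.1 PySem.Dict.empty).insert q.1.2 q.2))
            PySem.Dict.empty).items.map (fun p => (p.1, p.2.items))) :=
    by rw [← pv_bridge X Y (fun (d : PySem.Dict (String × String) Int) x => d.insert x (d.getD x 0 + 1)) PySem.Dict.empty h1 h2]; rfl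
  rw [h4, PySem.Dict.foldl_insert_getD_add_one_eq_counter]
  rw [PySem.List.foldl_congr_mem _ _ pvGStep _ (fun acc q _ => pv_setdefault_step acc q)]
  rw [pv_regroup_counter]

-- ===== VERDICT (by name: the statement is the Claim_ definition above) =====
theorem most_likely_tag_spec : Claim_equal_most_likely_tag := by
  intro X Y _ hpre
  obtain ⟨h1, h2⟩ := hpre
  unfold Spec_most_likely_tag
  rw [pv_A_eq X Y h1 h2, pv_B_eq X Y h1 h2]
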